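-- pv_equiv track=rewrite | github.com/hamzaahmmed0/artshield-ai | ml/training/run_inference.py | resolve_artist_name
-- ===== SOURCE A (Python) =====
-- def resolve_artist_name(requested_artist: str, available_artists: list[str]) -> str:
--     direct_lookup = {artist.lower(): artist for artist in available_artists}
--     normalized_lookup = {
--         artist.lower().replace("_", "-").replace(" ", "-"): artist for artist in available_artists
--     }
--     lowered = requested_artist.lower().strip()
--     normalized = lowered.replace("_", "-").replace(" ", "-")
--
--     if lowered in direct_lookup:
--         return direct_lookup[lowered]
--     if normalized in normalized_lookup:
--         return normalized_lookup[normalized]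
--
--     raise ValueError(
--         f"Unknown artist '{requested_artist}'. Available artists: {', '.join(sorted(available_artists))}"
--     )
-- ===== SOURCE B (Python) =====
-- def resolve_artist_name(requested_artist: str, available_artists: list[str]) -> str:
--     lowered = requested_artist.lower().strip()
--     normalized = lowered.replace("_", "-").replace(" ", "-")
--     norm_found = False
--     norm_hit = None
--     for artist in reversed(available_artists):
--         low = artist.lower()
--         if low == lowered:
--             return artist
--         if not norm_found and low.replace("_", "-").replace(" ", "-") == normalized:
--             norm_found = True
--             norm_hit = artist
--     if norm_found:
--         return norm_hit
--     raise ValueError(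
--         f"Unknown artist '{requested_artist}'. Available artists: {', '.join(sorted(available_artists))}"
--     )
-- ===== Notes on version B (the rewrite author's own statement) =====
-- stated objective: alternative
-- what changed: Replaces the two dict builds plus staged key lookups by a single reverse traversal with early exit: scanning reversed(available_artists), the first exact-lowercase hit is returned immediately (it is the last-wins winner), while the first normalized hit seen in reverse is remembered as a fallback candidate used only if no exact hit exists.
import Mathlib
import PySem

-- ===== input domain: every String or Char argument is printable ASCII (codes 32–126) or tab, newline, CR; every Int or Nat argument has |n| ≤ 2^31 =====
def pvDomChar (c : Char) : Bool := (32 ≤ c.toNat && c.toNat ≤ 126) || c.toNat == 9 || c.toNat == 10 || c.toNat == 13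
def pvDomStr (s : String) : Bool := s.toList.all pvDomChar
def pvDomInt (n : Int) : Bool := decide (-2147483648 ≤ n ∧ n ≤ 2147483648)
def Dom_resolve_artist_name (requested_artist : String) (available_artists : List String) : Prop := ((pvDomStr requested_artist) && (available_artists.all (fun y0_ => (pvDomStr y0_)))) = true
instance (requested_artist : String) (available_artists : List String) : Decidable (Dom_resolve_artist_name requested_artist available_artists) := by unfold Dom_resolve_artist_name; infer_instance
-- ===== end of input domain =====

-- B replaces A's two dict builds + staged lookups by one reverse traversal with early exit
-- (first exact hit in reverse = last-wins winner; first normalized hit in reverse kept as fallback).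

-- s.replace("_", "-").replace(" ", "-")  (shared normalization helper, used by both ports and Pre_)
def pvNorm (s : String) : String :=
  PySem.Str.replace (PySem.Str.replace s "_" "-") " " "-"

-- ===== PORT A =====
def resolve_artist_name (requested_artist : String) (available_artists : List String) : String :=
  let direct_lookup : PySem.Dict String String :=
    available_artists.foldl (fun d artist => d.insert (PySem.Str.lower artist) artist) PySem.Dict.empty
  let normalized_lookup : PySem.Dict String String :=
    available_artists.foldl (fun d artist => d.insert (pvNorm (PySem.Str.lower artist)) artist) PySem.Dict.empty
  let lowered := PySem.Str.strip (PySem.Str.lower requested_artist)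
  let normalized := pvNorm lowered
  match direct_lookup.get? lowered with
  | some v => v
  | none =>
    match normalized_lookup.get? normalized with
    | some v => v
    | none => ""  -- Python raises ValueError here; excluded by Pre_

-- ===== PORT B =====
-- the reversed for-loop of Source B: early return on an exact hit (some a), otherwise thread the
-- normalized-fallback candidate (norm_hit, kept only while it is none, like the norm_found flag)
def pvScan (lowered normalized : String) : List String → Option String → Option String
  | [], norm_hit => norm_hit
  | artist :: rest, norm_hit =>
    let low := PySem.Str.lower artist
    if low == lowered then some artist
    else pvScan lowered normalized rest
      (if norm_hit.isNone && (pvNorm low == normalized) then some artist else norm_hit)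

def resolve_artist_name_alt (requested_artist : String) (available_artists : List String) : String :=
  let lowered := PySem.Str.strip (PySem.Str.lower requested_artist)
  let normalized := pvNorm lowered
  match pvScan lowered normalized available_artists.reverse none with
  | some m => m
  | none => ""  -- Python raises ValueError here; excluded by Pre_

-- ===== PRECONDITION & SPEC =====
-- Pre_: some artist matches the lowered request directly or after "_"/" " → "-" normalization;
-- outside it both Pythons raise ValueError.
def Pre_resolve_artist_name (requested_artist : String) (available_artists : List String) : Prop :=
  (available_artists.any (fun a =>
      PySem.Str.lower a == PySem.Str.strip (PySem.Str.lower requested_artist))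
   || available_artists.any (fun a =>
      pvNorm (PySem.Str.lower a) == pvNorm (PySem.Str.strip (PySem.Str.lower requested_artist)))) = true

instance (requested_artist : String) (available_artists : List String) : Decidable (Pre_resolve_artist_name requested_artist available_artists) := by unfold Pre_resolve_artist_name; infer_instance

def pvWitness_resolve_artist_name : String × List String := ("A", ["a"])

def Spec_resolve_artist_name (requested_artist : String) (available_artists : List String) (out : String) : Prop := out = resolve_artist_name_alt requested_artist available_artists
instance (requested_artist : String) (available_artists : List String) (out : String) : Decidable (Spec_resolve_artist_name requested_artist available_artists out) := by unfold Spec_resolve_artist_name; infer_instance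

-- ===== CLAIM (what is proved, stated in full; the proofs are below) =====
def Claim_equal_resolve_artist_name : Prop := ∀ (requested_artist : String) (available_artists : List String), Dom_resolve_artist_name requested_artist available_artists → Pre_resolve_artist_name requested_artist available_artists → Spec_resolve_artist_name requested_artist available_artists (resolve_artist_name requested_artist available_artists)

-- ===== LEMMAS AND PROOFS =====

-- Looking up k in a dict built by a key-comprehension loop is the last-wins scan of the list.
theorem pv_get?_foldl_insert_key (key : String → String) (xs : List String)
    (d : PySem.Dict String String) (k : String) :
    (xs.foldl (fun d a => d.insert (key a) a) d).get? k =
      xs.foldl (fun acc a => if key a == k then some a else acc) (d.get? k) := by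
  induction xs generalizing d with
  | nil => rfl
  | cons x xs ih =>
    simp only [List.foldl_cons]
    rw [ih, PySem.Dict.get?_insert]
    by_cases h : key x = k
    · simp [h]
    · simp [h, Ne.symm h]

-- A last-wins scan is the first match of the reversed list (falling back to the initial value).
theorem pv_foldl_lastwins_find? (p : String → Bool) (xs : List String) (init : Option String) :
    xs.foldl (fun acc a => if p a then some a else acc) init =
      (xs.reverse.find? p).orElse (fun _ => init) := by
  induction xs generalizing init with
  | nil => rfl
  | cons x xs ih =>
    simp only [List.foldl_cons, List.reverse_cons, List.find?_append, ih]
    by_cases h : p x = true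
    · cases hx : xs.reverse.find? p <;> simp [h, Option.orElse]
    · cases hx : xs.reverse.find? p <;> simp [h, hx, Option.orElse]

-- Characterisation of B's fused reverse scan: exact hits take absolute priority, then the
-- threaded candidate, then the first normalized hit.
theorem pvScan_eq (lowered normalized : String) (ys : List String) (cand : Option String) :
    pvScan lowered normalized ys cand =
      ((ys.find? (fun a => PySem.Str.lower a == lowered)).orElse
        (fun _ => cand.orElse
          (fun _ => ys.find? (fun a => pvNorm (PySem.Str.lower a) == normalized)))) := by
  induction ys generalizing cand with
  | nil => cases cand <;> rfl
  | cons y ys ih =>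
    simp only [pvScan, List.find?]
    by_cases h : (PySem.Str.lower y == lowered) = true
    · simp [h, Option.orElse]
    · simp only [h, Bool.false_eq_true, if_false, ih]
      cases cand with
      | some c => simp [Option.orElse]
      | none =>
        by_cases hn : (pvNorm (PySem.Str.lower y) == normalized) = true
        · cases hd : ys.find? (fun a => PySem.Str.lower a == lowered) <;>
            simp [hn, Option.orElse]
        · simp [hn, Option.orElse]

theorem resolve_artist_name_eq_alt (requested_artist : String) (available_artists : List String) :
    resolve_artist_name requested_artist available_artists =
      resolve_artist_name_alt requested_artist available_artists := by
  unfold resolve_artist_name resolve_artist_name_alt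
  dsimp only
  rw [pv_get?_foldl_insert_key, pv_get?_foldl_insert_key, PySem.Dict.get?_empty,
      pv_foldl_lastwins_find?, pv_foldl_lastwins_find?, pvScan_eq]
  cases hd : available_artists.reverse.find?
      (fun a => PySem.Str.lower a == PySem.Str.strip (PySem.Str.lower requested_artist)) <;>
    cases hn : available_artists.reverse.find?
      (fun a => pvNorm (PySem.Str.lower a) ==
        pvNorm (PySem.Str.strip (PySem.Str.lower requested_artist))) <;>
    simp [Option.orElse]

-- ===== VERDICT (by name: the statement is the Claim_ definition above) =====
theorem resolve_artist_name_spec : Claim_equal_resolve_artist_name := by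
  intro r av _ _
  unfold Spec_resolve_artist_name
  exact resolve_artist_name_eq_alt r av
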